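-- pv_equiv track=rewrite | github.com/SunsettiaSama/Algorithm_Learning | 6-图论/A1-图论技巧/Z-子树与节点对的距离和-米哈游.py | compute_answers
-- ===== SOURCE A (Python) =====
-- def compute_answers(n, graph, parent, order):
--     """
--     自底向上计算每个节点的子树内所有点对距离和。
--     参数:
--         n: 节点总数
--         graph: 邻接表
--         parent: 每个节点的父节点（根节点的父节点为 -1）
--         order: 前序遍历顺序（父节点在子节点之前）
--     返回:
--         ans: 每个节点对应子树的答案（所有点对距离和）
--     """
--     # 子树大小（包括节点自身）
--     subtree_size = [1] * (n + 1)
--     # 子树内所有节点到当前节点的距离之和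
--     sum_dist_to_node = [0] * (n + 1)
--     # 最终答案：子树内所有点对的距离和
--     answer = [0] * (n + 1)
--
--     # 逆序遍历前序顺序 = 后序顺序（孩子先于父亲）
--     for node in reversed(order):
--         # 初始化当前正在合并的集合（开始时只有 node 自己）
--         merged_size = 1          # 已经合并的节点综述
--         merged_sum_dist = 0      # 这些已合并集合中所有节点到 node 的距离和。
--         merged_pair_sum = 0      # 已合并集合内部所有点对的距离和（即子树内跨合并部分但已经计算过的答案，不包含后续将合并的新子树部分）。
--
--         # 现在要合并一个新的子树 child 的节点集合。
--         # order+逆序模拟dfs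
--         for child in graph[node]:
--             # 跳过父节点，只处理真正的子节点
--             if child == parent[node]:
--                 continue
--
--             dist_child_to_node = sum_dist_to_node[child] + subtree_size[child]
--             # 这里是推导出来的公式啊woc，原来如此
--             cross_pairs = merged_sum_dist * subtree_size[child] + dist_child_to_node * merged_size
--             merged_pair_sum += answer[child] + cross_pairs
--
--             # 合并统计信息
--             merged_sum_dist += dist_child_to_node
--             merged_size += subtree_size[child]
--
--         # 将 node 的最终统计信息存入数组
--         subtree_size[node] = merged_size
--         sum_dist_to_node[node] = merged_sum_dist
--         answer[node] = merged_pair_sum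
--
--     return answer
-- ===== SOURCE B (Python) =====
-- def compute_answers(n, graph, parent, order):
--     # Same backward pass over order, but each node's statistics are computed
--     # from order-independent aggregates over its children with the symmetric
--     # closed formula, instead of A's incremental cross-pair merge.
--     subtree_size = [1] * (n + 1)
--     sum_dist_to_node = [0] * (n + 1)
--     answer = [0] * (n + 1)
--     for node in reversed(order):
--         kids = [c for c in graph[node] if c != parent[node]]
--         S = sum(subtree_size[c] for c in kids)
--         D = sum(sum_dist_to_node[c] + subtree_size[c] for c in kids)
--         P = sum(answer[c] for c in kids)
--         X = sum((sum_dist_to_node[c] + subtree_size[c]) * subtree_size[c] for c in kids)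
--         subtree_size[node] = 1 + S
--         sum_dist_to_node[node] = D
--         answer[node] = P + D + D * S - X
--     return answer
-- ===== Notes on version B (the rewrite author's own statement) =====
-- stated objective: alternative
-- what changed: A's incremental child-merge (running merged_size/merged_sum_dist/merged_pair_sum with a cross_pairs term per child) is replaced by order-independent aggregate sums S, D, P, X over the filtered children and the symmetric closed formula answer = P + D + D*S - sum(d_c*s_c).
import Mathlib
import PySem

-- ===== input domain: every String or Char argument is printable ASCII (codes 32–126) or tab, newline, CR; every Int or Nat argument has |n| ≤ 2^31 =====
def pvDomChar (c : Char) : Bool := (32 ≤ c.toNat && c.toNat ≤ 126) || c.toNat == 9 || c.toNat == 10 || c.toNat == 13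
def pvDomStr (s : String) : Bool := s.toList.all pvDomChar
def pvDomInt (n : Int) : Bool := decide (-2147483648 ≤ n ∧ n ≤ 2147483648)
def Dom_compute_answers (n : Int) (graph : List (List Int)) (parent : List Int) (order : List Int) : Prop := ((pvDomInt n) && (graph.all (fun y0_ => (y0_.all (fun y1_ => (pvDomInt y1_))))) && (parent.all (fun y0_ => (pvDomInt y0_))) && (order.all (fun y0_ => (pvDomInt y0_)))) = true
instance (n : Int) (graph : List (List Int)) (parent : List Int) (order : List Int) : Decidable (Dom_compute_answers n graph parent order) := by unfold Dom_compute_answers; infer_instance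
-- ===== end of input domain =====

-- B replaces A's incremental child-merge by aggregate sums over the children and a
-- symmetric closed formula (alternative decomposition, same asymptotic cost).

-- ===== PORT A =====
-- one child-merge step of A's inner loop (the `continue` and the incremental update)
def pvInnerStep (sz sd ans : List Int) (p : Int)
    (acc : Int × Int × Int) (child : Int) : Int × Int × Int :=
  if child == p then acc
  else
    let d := PySem.List.pyGetD sd child 0 + PySem.List.pyGetD sz child 0
    let cross := acc.2.1 * PySem.List.pyGetD sz child 0 + d * acc.1
    (acc.1 + PySem.List.pyGetD sz child 0, acc.2.1 + d,
     acc.2.2 + PySem.List.pyGetD ans child 0 + cross)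

-- one step of A's outer loop: merge the children of `node` incrementally
def pvStepA (graph : List (List Int)) (parent : List Int)
    (st : List Int × List Int × List Int) (node : Int) : List Int × List Int × List Int :=
  let sz := st.1
  let sd := st.2.1
  let ans := st.2.2
  let inner := (PySem.List.pyGetD graph node []).foldl
    (pvInnerStep sz sd ans (PySem.List.pyGetD parent node 0)) (1, 0, 0)
  (PySem.List.pySetD sz node inner.1, PySem.List.pySetD sd node inner.2.1,
   PySem.List.pySetD ans node inner.2.2)

def compute_answers (n : Int) (graph : List (List Int)) (parent : List Int) (order : List Int) : List Int :=
  let m := (n + 1).toNat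
  (order.reverse.foldl (pvStepA graph parent)
    (List.replicate m 1, List.replicate m 0, List.replicate m 0)).2.2

-- ===== PORT B =====
-- one step of B's outer loop: aggregate sums over the filtered children, closed formula
def pvStepB (graph : List (List Int)) (parent : List Int)
    (st : List Int × List Int × List Int) (node : Int) : List Int × List Int × List Int :=
  let sz := st.1
  let sd := st.2.1
  let ans := st.2.2
  let kids := (PySem.List.pyGetD graph node []).filter (fun c => c != PySem.List.pyGetD parent node 0)
  let S := (kids.map (fun c => PySem.List.pyGetD sz c 0)).sum
  let D := (kids.map (fun c => PySem.List.pyGetD sd c 0 + PySem.List.pyGetD sz c 0)).sum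
  let P := (kids.map (fun c => PySem.List.pyGetD ans c 0)).sum
  let X := (kids.map (fun c => (PySem.List.pyGetD sd c 0 + PySem.List.pyGetD sz c 0) * PySem.List.pyGetD sz c 0)).sum
  (PySem.List.pySetD sz node (1 + S), PySem.List.pySetD sd node D,
   PySem.List.pySetD ans node (P + D + D * S - X))

def compute_answers_alt (n : Int) (graph : List (List Int)) (parent : List Int) (order : List Int) : List Int :=
  let m := (n + 1).toNat
  (order.reverse.foldl (pvStepB graph parent)
    (List.replicate m 1, List.replicate m 0, List.replicate m 0)).2.2

-- ===== PRECONDITION & SPEC =====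
-- Pre_ excludes exactly the inputs on which the Python A raises IndexError: some node of
-- `order` is out of range for graph / the stat arrays (length n+1), or (when its adjacency
-- list is nonempty) out of range for parent, or a child that is not the parent is out of
-- range for the stat arrays.  On every other input A returns normally.
def Pre_compute_answers (n : Int) (graph : List (List Int)) (parent : List Int) (order : List Int) : Prop :=
  ∀ node ∈ order,
    PySem.Raise.InRange graph.length node ∧
    PySem.Raise.InRange (n + 1).toNat node ∧
    (PySem.List.pyGetD graph node [] = [] ∨
      (PySem.Raise.InRange parent.length node ∧
        ∀ c ∈ PySem.List.pyGetD graph node [],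
          c = PySem.List.pyGetD parent node 0 ∨ PySem.Raise.InRange (n + 1).toNat c))
instance (n : Int) (graph : List (List Int)) (parent : List Int) (order : List Int) : Decidable (Pre_compute_answers n graph parent order) := by unfold Pre_compute_answers; infer_instance

def pvWitness_compute_answers : Int × List (List Int) × List Int × List Int :=
  (2, [[1, 2], [0], [0]], [-1, 0, 0], [0, 1, 2])

def Spec_compute_answers (n : Int) (graph : List (List Int)) (parent : List Int) (order : List Int) (out : List Int) : Prop := out = compute_answers_alt n graph parent order
instance (n : Int) (graph : List (List Int)) (parent : List Int) (order : List Int) (out : List Int) : Decidable (Spec_compute_answers n graph parent order out) := by unfold Spec_compute_answers; infer_instance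

-- ===== CLAIM (what is proved, stated in full; the proofs are below) =====
def Claim_equal_compute_answers : Prop := ∀ (n : Int) (graph : List (List Int)) (parent : List Int) (order : List Int), Dom_compute_answers n graph parent order → Pre_compute_answers n graph parent order → Spec_compute_answers n graph parent order (compute_answers n graph parent order)

-- ===== LEMMAS AND PROOFS =====

-- A's incremental inner fold, started at (ms, md, mp), equals the closed form built
-- from B's aggregate sums over the filtered children.
lemma pv_inner_eq (p : Int) (sz sd ans : List Int) (l : List Int) :
    ∀ ms md mp : Int,
      l.foldl (pvInnerStep sz sd ans p) (ms, md, mp)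
      = (ms + ((l.filter (fun c => c != p)).map (fun c => PySem.List.pyGetD sz c 0)).sum,
         md + ((l.filter (fun c => c != p)).map (fun c => PySem.List.pyGetD sd c 0 + PySem.List.pyGetD sz c 0)).sum,
         mp + ((l.filter (fun c => c != p)).map (fun c => PySem.List.pyGetD ans c 0)).sum
            + ((l.filter (fun c => c != p)).map (fun c => PySem.List.pyGetD sd c 0 + PySem.List.pyGetD sz c 0)).sum * ms
            + ((l.filter (fun c => c != p)).map (fun c => PySem.List.pyGetD sz c 0)).sum * md
            + ((l.filter (fun c => c != p)).map (fun c => PySem.List.pyGetD sd c 0 + PySem.List.pyGetD sz c 0)).sum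
              * ((l.filter (fun c => c != p)).map (fun c => PySem.List.pyGetD sz c 0)).sum
            - ((l.filter (fun c => c != p)).map (fun c => (PySem.List.pyGetD sd c 0 + PySem.List.pyGetD sz c 0) * PySem.List.pyGetD sz c 0)).sum) := by
  induction l with
  | nil => intro ms md mp; simp
  | cons c l ih =>
    intro ms md mp
    rw [List.foldl_cons]
    by_cases hc : c = p
    · have h1 : pvInnerStep sz sd ans p (ms, md, mp) c = (ms, md, mp) := by
        simp [pvInnerStep, hc]
      have h2 : (c :: l).filter (fun c => c != p) = l.filter (fun c => c != p) := by
        simp [hc]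
      rw [h1, h2]
      exact ih ms md mp
    · have h1 : pvInnerStep sz sd ans p (ms, md, mp) c
          = (ms + PySem.List.pyGetD sz c 0,
             md + (PySem.List.pyGetD sd c 0 + PySem.List.pyGetD sz c 0),
             mp + PySem.List.pyGetD ans c 0
               + (md * PySem.List.pyGetD sz c 0
                  + (PySem.List.pyGetD sd c 0 + PySem.List.pyGetD sz c 0) * ms)) := by
        simp [pvInnerStep, hc]
      have h2 : (c :: l).filter (fun c => c != p) = c :: l.filter (fun c => c != p) := by
        simp [hc]
      rw [h1, h2, ih]
      simp only [List.map_cons, List.sum_cons]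
      refine Prod.ext ?_ (Prod.ext ?_ ?_) <;> simp <;> ring

-- the two per-node steps agree
lemma pv_step_eq (graph : List (List Int)) (parent : List Int) :
    pvStepA graph parent = pvStepB graph parent := by
  funext st node
  simp only [pvStepA, pvStepB]
  rw [pv_inner_eq]
  refine congrArg₂ _ ?_ (congrArg₂ _ ?_ ?_) <;> · apply congrArg; ring

-- ===== VERDICT (by name: the statement is the Claim_ definition above) =====
theorem compute_answers_spec : Claim_equal_compute_answers := by
  intro n graph parent order _ _
  unfold Spec_compute_answers compute_answers compute_answers_alt
  rw [pv_step_eq]
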